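-- pv_equiv track=rewrite | github.com/anurag-198/CarManufacturingProblem | model/players.py | maximums
-- ===== SOURCE A (Python) =====
-- def maximums(list):
--     max_distance = - 1
--     result = []
--     for (distance, a) in list:
--         if distance < max_distance:
--             pass
--         else:
--             if distance == max_distance:
--                 result.append(a)
--             else:
--                 max_distance = distance
--                 result = [a]
--     return result
-- ===== SOURCE B (Python) =====
-- def maximums(list):
--     max_distance = -1
--     for (distance, a) in list:
--         if distance > max_distance:
--             max_distance = distance
--     return [a for (distance, a) in list if distance == max_distance]
-- ===== Notes on version B (the rewrite author's own statement) =====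
-- stated objective: simpler
-- what changed: Replaces A's single pass maintaining a result list (rebuilt on each new maximum) by two passes: one to find the maximum distance (floored at -1), then a comprehension collecting the tied elements.
import Mathlib
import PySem

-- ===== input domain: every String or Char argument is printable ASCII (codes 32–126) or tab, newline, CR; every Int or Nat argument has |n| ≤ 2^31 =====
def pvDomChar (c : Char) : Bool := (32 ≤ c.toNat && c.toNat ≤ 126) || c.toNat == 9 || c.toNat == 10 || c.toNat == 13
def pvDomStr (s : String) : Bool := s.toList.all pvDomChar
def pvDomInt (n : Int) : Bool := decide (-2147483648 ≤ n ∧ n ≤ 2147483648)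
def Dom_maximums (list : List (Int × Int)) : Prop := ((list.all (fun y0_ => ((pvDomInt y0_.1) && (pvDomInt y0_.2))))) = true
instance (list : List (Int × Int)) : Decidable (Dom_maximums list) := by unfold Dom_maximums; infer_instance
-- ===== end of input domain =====

-- B replaces A's single pass maintaining a rebuilt result list by two simpler passes: find the maximum distance (floored at -1), then collect the tied elements (objective: simpler).


-- ===== PORT A =====
def maximums (list : List (Int × Int)) : List Int :=
  (list.foldl (fun (st : Int × List Int) (p : Int × Int) =>
    if p.1 < st.1 then st
    else if p.1 = st.1 then (st.1, st.2 ++ [p.2])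
    else (p.1, [p.2])) (-1, [])).2

-- ===== PORT B =====
def maximums_alt (list : List (Int × Int)) : List Int :=
  let max_distance := list.foldl (fun m (p : Int × Int) => if p.1 > m then p.1 else m) (-1)
  list.filterMap (fun p => if p.1 = max_distance then some p.2 else none)

-- ===== PRECONDITION & SPEC =====
def Spec_maximums (list : List (Int × Int)) (out : List Int) : Prop := out = maximums_alt list
instance (list : List (Int × Int)) (out : List Int) : Decidable (Spec_maximums list out) := by unfold Spec_maximums; infer_instance

-- ===== CLAIM (what is proved, stated in full; the proofs are below) =====
def Claim_equal_maximums : Prop := ∀ (list : List (Int × Int)), Dom_maximums list → Spec_maximums list (maximums list)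

-- ===== LEMMAS AND PROOFS =====

-- ===== VERDICT (by name: the statement is the Claim_ definition above) =====
-- the foldl of A's loop body, named for the induction
def aStep (st : Int × List Int) (p : Int × Int) : Int × List Int :=
  if p.1 < st.1 then st
  else if p.1 = st.1 then (st.1, st.2 ++ [p.2])
  else (p.1, [p.2])

def bMax (m : Int) (l : List (Int × Int)) : Int :=
  l.foldl (fun m (p : Int × Int) => if p.1 > m then p.1 else m) m

theorem le_bMax (m : Int) (l : List (Int × Int)) : m ≤ bMax m l := by
  induction l generalizing m with
  | nil => simp [bMax]
  | cons h t ih =>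
    simp only [bMax, List.foldl_cons]
    split
    · exact le_trans (le_of_lt (by assumption)) (ih h.1)
    · exact ih m

theorem loop_invariant (l : List (Int × Int)) (m : Int) (r : List Int) :
    (l.foldl aStep (m, r)).2 =
      (if bMax m l = m then r else []) ++
        l.filterMap (fun p => if p.1 = bMax m l then some p.2 else none) := by
  induction l generalizing m r with
  | nil => simp [bMax]
  | cons h t ih =>
    have hmax : bMax m (h :: t) = bMax (if h.1 > m then h.1 else m) t := by
      simp [bMax]
    rcases lt_trichotomy h.1 m with hlt | heq | hgt
    · have hM : bMax m (h :: t) = bMax m t := by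
        rw [hmax, if_neg (by omega)]
      have hne : ¬ h.1 = bMax m t := by
        have := le_bMax m t; omega
      rw [List.foldl_cons, List.filterMap_cons, hM]
      simp only [aStep, if_pos hlt, if_neg hne]
      exact ih m r
    · have hM : bMax m (h :: t) = bMax m t := by
        rw [hmax]; split <;> simp_all
      rw [List.foldl_cons, List.filterMap_cons, hM]
      simp only [aStep, if_neg (by omega : ¬ h.1 < m), if_pos heq]
      rw [ih m (r ++ [h.2])]
      by_cases hc : bMax m t = m
      · rw [if_pos hc, if_pos hc, if_pos (by omega : h.1 = bMax m t)]
        simp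
      · rw [if_neg hc, if_neg hc, if_neg (by have := le_bMax m t; omega : ¬ h.1 = bMax m t)]
    · have hM : bMax m (h :: t) = bMax h.1 t := by
        rw [hmax, if_pos hgt]
      have hMm : ¬ bMax h.1 t = m := by
        have := le_bMax h.1 t; omega
      rw [List.foldl_cons, List.filterMap_cons, hM]
      simp only [aStep, if_neg (by omega : ¬ h.1 < m), if_neg (by omega : ¬ h.1 = m),
        if_neg hMm]
      rw [ih h.1 [h.2]]
      by_cases hc : bMax h.1 t = h.1
      · rw [if_pos hc, if_pos (by omega : h.1 = bMax h.1 t)]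
        simp
      · rw [if_neg hc, if_neg (by omega : ¬ h.1 = bMax h.1 t)]

-- ===== VERDICT (by name: the statement is the Claim_ definition above) =====
theorem maximums_spec : Claim_equal_maximums := by
  intro list _
  unfold Spec_maximums maximums maximums_alt
  have h := loop_invariant list (-1) []
  unfold aStep bMax at h
  rw [h]
  split <;> simp
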